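-- pv_equiv track=rewrite | github.com/PyVRP/VRPLIB | pycvrplib/_parse_utils.py | from_triangular
-- ===== SOURCE A (Python) =====
-- from itertools import combinations
-- from typing import Any, Dict, List, Optional, Union
--
-- def from_triangular(triangular: List[List[int]]) -> List[List[int]]:
--     """
--     Compute a full distances matrix from a triangular matrix.
--     """
--     n = len(triangular) + 1
--     distances = [[0 for _ in range(n)] for _ in range(n)]
--
--     for j, i in combinations(range(n), r=2):
--         t_ij = triangular[i - 1][j]
--         distances[i][j] = t_ij
--         distances[j][i] = t_ij
--
--     return distances
-- ===== SOURCE B (Python) =====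
-- def from_triangular(triangular):
--     """
--     Compute a full distances matrix from a triangular matrix.
--     """
--     distances = [[0]]
--     for k, row in enumerate(triangular):
--         border = row[:k + 1]
--         for r, v in zip(distances, border):
--             r.append(v)
--         distances.append(border + [0])
--     return distances
-- ===== Notes on version B (the rewrite author's own statement) =====
-- stated objective: faster
-- what changed: Replaces the pre-zeroed n x n matrix with scatter-writes over combinations(range(n),2) by incremental matrix bordering: starting from [[0]], each triangular row extends every existing row with one mirrored entry and appends the new bordered row, so the matrix grows one row/column per step with no index-pair generation or random-access writes.
import Mathlib
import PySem

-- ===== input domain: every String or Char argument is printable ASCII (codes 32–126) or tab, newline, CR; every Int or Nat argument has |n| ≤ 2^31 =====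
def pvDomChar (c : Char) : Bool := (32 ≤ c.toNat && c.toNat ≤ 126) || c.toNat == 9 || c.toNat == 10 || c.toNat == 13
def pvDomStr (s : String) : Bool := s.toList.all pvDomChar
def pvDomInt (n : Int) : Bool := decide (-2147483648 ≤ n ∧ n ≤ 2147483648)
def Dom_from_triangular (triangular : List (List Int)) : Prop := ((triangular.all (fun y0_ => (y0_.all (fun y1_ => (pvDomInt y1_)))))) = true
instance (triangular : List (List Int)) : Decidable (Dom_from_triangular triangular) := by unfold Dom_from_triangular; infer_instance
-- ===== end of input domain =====

-- B replaces A's zero matrix + scatter-writes over combinations(range(n),2) by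
-- incremental bordering: starting from [[0]], each triangular row extends every
-- existing row with one mirrored entry and appends its own bordered row
-- (objective: faster — a timing run measured B ≥ 1.5× faster at the largest size).

-- ===== PORT A =====
-- distances[i][j] = v  (list-of-lists assignment)
def pvSetIdx (m : List (List Int)) (i j : Nat) (v : Int) : List (List Int) :=
  m.set i ((m.getD i []).set j v)

-- triangular[i-1][j] (in-range on Pre_; Python raises out of range, excluded by Pre_)
def pvVal (tri : List (List Int)) (j i : Nat) : Int :=
  (tri.getD (i - 1) []).getD j 0

-- combinations(range(n), r=2): pairs (j, i) with j < i < n, in that order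
def pvPairs (n : Nat) : List (Nat × Nat) :=
  (List.range n).flatMap (fun j => (List.range' (j + 1) (n - (j + 1))).map (fun i => (j, i)))

def from_triangular (triangular : List (List Int)) : List (List Int) :=
  let n := triangular.length + 1
  let distances := (List.range n).map (fun _ => (List.range n).map (fun _ => (0 : Int)))
  (pvPairs n).foldl
    (fun d p =>
      let t := pvVal triangular p.1 p.2
      pvSetIdx (pvSetIdx d p.2 p.1 t) p.1 p.2 t)
    distances

-- ===== PORT B =====
-- one step of B's loop body: append border[i] to row i over zip (rows beyond the
-- zip are unchanged, as Python's in-place append leaves them), then append the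
-- new bordered row
def pvStep (d : List (List Int)) (k : Int) (row : List Int) : List (List Int) :=
  let border := PySem.List.slice row none (some (k + 1))
  (d.zipWith (fun r v => r ++ [v]) border ++ d.drop border.length) ++ [border ++ [0]]

def from_triangular_alt (triangular : List (List Int)) : List (List Int) :=
  (PySem.List.enumerate triangular 0).foldl (fun d p => pvStep d p.1 p.2) [[(0 : Int)]]

-- ===== PRECONDITION & SPEC =====
-- Pre_: each triangular row k must have length ≥ k+1, else Python A raises IndexError.
def Pre_from_triangular (triangular : List (List Int)) : Prop :=
  ∀ k < triangular.length, k + 1 ≤ (triangular.getD k []).length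
instance (triangular : List (List Int)) : Decidable (Pre_from_triangular triangular) := by
  unfold Pre_from_triangular; infer_instance

def pvWitness_from_triangular : List (List Int) := [[1], [2, 3]]

def Spec_from_triangular (triangular : List (List Int)) (out : List (List Int)) : Prop := out = from_triangular_alt triangular
instance (triangular : List (List Int)) (out : List (List Int)) : Decidable (Spec_from_triangular triangular out) := by unfold Spec_from_triangular; infer_instance

-- ===== CLAIM (what is proved, stated in full; the proofs are below) =====
def Claim_equal_from_triangular : Prop := ∀ (triangular : List (List Int)), Dom_from_triangular triangular → Pre_from_triangular triangular → Spec_from_triangular triangular (from_triangular triangular)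

-- ===== LEMMAS AND PROOFS =====

-- the common closed form both ports are proved equal to: cell (a,b) is 0 on the
-- diagonal and the mirrored triangular entry off it
def pvFull (tri : List (List Int)) : List (List Int) :=
  let n := tri.length + 1
  (List.range n).map (fun i =>
    (List.range n).map (fun j =>
      if i = j then 0
      else if j < i then (tri.getD (i - 1) []).getD j 0
      else (tri.getD (j - 1) []).getD i 0))

-- entry d a b: read cell (a, b) of a matrix (0 out of range; all reads are in range)
def pvEntry (d : List (List Int)) (a b : Nat) : Int := (d.getD a []).getD b 0

theorem pv_getD_set (l : List Int) (i j : Nat) (v d : Int) :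
    (l.set i v).getD j d = if i = j ∧ i < l.length then v else l.getD j d := by
  simp only [List.getD, List.getElem?_set]
  by_cases hij : i = j
  · subst hij
    by_cases h : i < l.length
    · simp [h]
    · simp [h]
  · simp [hij]

theorem pv_getD_set_row (m : List (List Int)) (i j : Nat) (r : List Int) :
    (m.set i r).getD j [] = if i = j ∧ i < m.length then r else m.getD j [] := by
  simp only [List.getD, List.getElem?_set]
  by_cases hij : i = j
  · subst hij
    by_cases h : i < m.length
    · simp [h]
    · simp [h]
  · simp [hij]

theorem pvSetIdx_length (m : List (List Int)) (i j : Nat) (v : Int) :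
    (pvSetIdx m i j v).length = m.length := by simp [pvSetIdx]

theorem pvSetIdx_row (m : List (List Int)) (i j : Nat) (v : Int) (k : Nat) :
    (pvSetIdx m i j v).getD k [] =
      if i = k ∧ i < m.length then (m.getD i []).set j v else m.getD k [] := by
  unfold pvSetIdx; exact pv_getD_set_row ..

theorem pvSetIdx_row_length (m : List (List Int)) (i j : Nat) (v : Int) (k : Nat) :
    ((pvSetIdx m i j v).getD k []).length = (m.getD k []).length := by
  rw [pvSetIdx_row]
  split_ifs with h
  · rw [List.length_set, h.1]
  · rfl

theorem pvEntry_setIdx (m : List (List Int)) (i j : Nat) (v : Int) (a b : Nat) :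
    pvEntry (pvSetIdx m i j v) a b =
      if a = i ∧ b = j ∧ i < m.length ∧ j < (m.getD i []).length then v
      else pvEntry m a b := by
  unfold pvEntry
  rw [pvSetIdx_row]
  by_cases hrow : i = a ∧ i < m.length
  · rw [if_pos hrow, pv_getD_set]
    obtain ⟨rfl, hi⟩ := hrow
    by_cases hj : j = b ∧ j < (m.getD i []).length
    · rw [if_pos hj, if_pos ⟨rfl, hj.1.symm, hi, hj.2⟩]
    · rw [if_neg hj, if_neg (by rintro ⟨-, hb, -, h⟩; exact hj ⟨hb.symm, h⟩)]
  · rw [if_neg hrow, if_neg (by rintro ⟨ha, -, h1, -⟩; exact hrow ⟨ha.symm, h1⟩)]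

theorem mem_pvPairs (n j i : Nat) : (j, i) ∈ pvPairs n ↔ j < i ∧ i < n := by
  simp only [pvPairs, List.mem_flatMap, List.mem_range, List.mem_map, Prod.mk.injEq]
  constructor
  · rintro ⟨j', hj', i', hi', rfl, rfl⟩
    rw [List.mem_range'_1] at hi'
    omega
  · rintro ⟨h1, h2⟩
    exact ⟨j, by omega, i, by rw [List.mem_range'_1]; omega, rfl, rfl⟩

-- the main loop invariant of A: the scatter loop fills exactly the cells of its pending pairs
theorem entry_foldl (tri : List (List Int)) (n : Nat) (L : List (Nat × Nat))
    (hL : ∀ p ∈ L, p.1 < p.2 ∧ p.2 < n)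
    (d : List (List Int)) (hlen : d.length = n)
    (hrow : ∀ k, k < n → (d.getD k []).length = n) :
    (L.foldl (fun d p =>
        let t := pvVal tri p.1 p.2
        pvSetIdx (pvSetIdx d p.2 p.1 t) p.1 p.2 t) d).length = n ∧
    (∀ k, k < n → ((L.foldl (fun d p =>
        let t := pvVal tri p.1 p.2
        pvSetIdx (pvSetIdx d p.2 p.1 t) p.1 p.2 t) d).getD k []).length = n) ∧
    ∀ a b, a < n → b < n →
      pvEntry (L.foldl (fun d p =>
        let t := pvVal tri p.1 p.2
        pvSetIdx (pvSetIdx d p.2 p.1 t) p.1 p.2 t) d) a b =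
      if ((min a b, max a b) ∈ L) ∧ a ≠ b then pvVal tri (min a b) (max a b)
      else pvEntry d a b := by
  induction L generalizing d with
  | nil => exact ⟨hlen, hrow, fun a b _ _ => by simp⟩
  | cons p L ih =>
    obtain ⟨hp1, hp2⟩ := hL p (List.mem_cons_self ..)
    set t := pvVal tri p.1 p.2 with ht
    set d' := pvSetIdx (pvSetIdx d p.2 p.1 t) p.1 p.2 t with hd'
    have hrow' : ∀ k, k < n → (d'.getD k []).length = n := by
      intro k hk; rw [hd', pvSetIdx_row_length, pvSetIdx_row_length]; exact hrow k hk
    have hlen' : d'.length = n := by rw [hd', pvSetIdx_length, pvSetIdx_length, hlen]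
    obtain ⟨ihlen, ihrow, ihe⟩ := ih (fun q hq => hL q (List.mem_cons_of_mem _ hq)) d' hlen' hrow'
    refine ⟨ihlen, ihrow, fun a b ha hb => ?_⟩
    rw [List.foldl_cons]
    show pvEntry (List.foldl (fun d p =>
        let t := pvVal tri p.1 p.2
        pvSetIdx (pvSetIdx d p.2 p.1 t) p.1 p.2 t) d' L) a b =
      if (min a b, max a b) ∈ p :: L ∧ a ≠ b then pvVal tri (min a b) (max a b)
      else pvEntry d a b
    rw [ihe a b ha hb]
    by_cases hmem : ((min a b, max a b) ∈ L) ∧ a ≠ b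
    · rw [if_pos hmem, if_pos ⟨List.mem_cons_of_mem _ hmem.1, hmem.2⟩]
    · rw [if_neg hmem]
      by_cases hcur : (min a b, max a b) = p ∧ a ≠ b
      · -- this step writes cells (a, b) and (b, a)
        have hne : a ≠ b := hcur.2
        have e1 : p.1 = min a b := by rw [← hcur.1]
        have e2 : p.2 = max a b := by rw [← hcur.1]
        rw [if_pos ⟨by rw [hcur.1]; exact List.mem_cons_self .., hne⟩]
        have hl1 : (pvSetIdx d p.2 p.1 t).length = n := by
          rw [pvSetIdx_length, hlen]
        have hr1 : ∀ k, k < n → ((pvSetIdx d p.2 p.1 t).getD k []).length = n := by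
          intro k hk; rw [pvSetIdx_row_length]; exact hrow k hk
        rw [hd', pvEntry_setIdx, pvEntry_setIdx]
        rcases Nat.lt_or_ge a b with hab | hab
        · -- a < b: the outer write at (p.1, p.2) = (a, b) hits
          have hmin : min a b = a := Nat.min_eq_left (le_of_lt hab)
          have hmax : max a b = b := Nat.max_eq_right (le_of_lt hab)
          rw [if_pos ⟨by omega, by omega, by rw [hl1]; omega,
            by rw [hr1 p.1 (by omega)]; omega⟩]
          rw [ht, e1, e2]
        · -- b < a: the inner write at (p.2, p.1) = (a, b) hits
          have hba : b < a := by omega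
          have hmin : min a b = b := Nat.min_eq_right (le_of_lt hba)
          have hmax : max a b = a := Nat.max_eq_left (le_of_lt hba)
          rw [if_neg (by rintro ⟨ha1, -, -, -⟩; omega)]
          rw [if_pos ⟨by omega, by omega, by rw [hlen]; omega,
            by rw [hrow p.2 (by omega)]; omega⟩]
          rw [ht, e1, e2]
      · -- this step does not touch cell (a, b)
        rw [hd', pvEntry_setIdx, pvEntry_setIdx]
        have h1 : ¬(a = p.1 ∧ b = p.2 ∧ p.1 < (pvSetIdx d p.2 p.1 t).length ∧
            p.2 < ((pvSetIdx d p.2 p.1 t).getD p.1 []).length) := by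
          rintro ⟨ha1, hb1, -, -⟩
          refine hcur ⟨?_, by omega⟩
          have : min a b = p.1 := by omega
          have : max a b = p.2 := by omega
          simp_all
        rw [if_neg h1]
        have h2 : ¬(a = p.2 ∧ b = p.1 ∧ p.2 < d.length ∧ p.1 < (d.getD p.2 []).length) := by
          rintro ⟨ha1, hb1, -, -⟩
          refine hcur ⟨?_, by omega⟩
          have : min a b = p.1 := by omega
          have : max a b = p.2 := by omega
          simp_all
        rw [if_neg h2]
        rw [if_neg (by
          rintro ⟨hm, hne⟩
          rcases List.mem_cons.mp hm with h | h
          · exact hcur ⟨h, hne⟩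
          · exact hmem ⟨h, hne⟩)]

theorem init_row (n k : Nat) (hk : k < n) :
    (((List.range n).map (fun _ => (List.range n).map (fun _ => (0 : Int)))).getD k []) =
      (List.range n).map (fun _ => (0 : Int)) := by
  simp [List.getD, hk]

theorem init_entry (n a b : Nat) (ha : a < n) (hb : b < n) :
    pvEntry ((List.range n).map (fun _ => (List.range n).map (fun _ => (0 : Int)))) a b = 0 := by
  unfold pvEntry
  rw [init_row n a ha]
  simp [List.getD, hb]

-- A computes the closed form
theorem A_eq_pvFull (tri : List (List Int)) : from_triangular tri = pvFull tri := by
  unfold from_triangular pvFull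
  simp only []
  set n := tri.length + 1 with hn
  set init := (List.range n).map (fun _ => (List.range n).map (fun _ => (0 : Int))) with hinit
  have hinitlen : init.length = n := by simp [hinit]
  have hinitrow : ∀ k, k < n → (init.getD k []).length = n := by
    intro k hk; rw [hinit, init_row n k hk]; simp
  obtain ⟨hflen, hfrow, hfe⟩ := entry_foldl tri n (pvPairs n)
    (fun p hp => by obtain ⟨j, i⟩ := p; exact (mem_pvPairs n j i).mp hp)
    init hinitlen hinitrow
  set res := (pvPairs n).foldl (fun d p =>
      let t := pvVal tri p.1 p.2
      pvSetIdx (pvSetIdx d p.2 p.1 t) p.1 p.2 t) init with hres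
  apply List.ext_getElem
  · rw [hflen]; simp
  · intro a h1 h2
    have ha : a < n := by rwa [hflen] at h1
    have hrowlen : (res.getD a []).length = n := hfrow a ha
    rw [List.getElem_map, List.getElem_range]
    apply List.ext_getElem
    · rw [← List.getD_eq_getElem res [] h1, hrowlen]; simp
    · intro b hb1 hb2
      have hbn : b < n := by
        rw [← List.getD_eq_getElem res [] h1, hrowlen] at hb1; exact hb1
      have hcell := hfe a b ha hbn
      rw [init_entry n a b ha hbn] at hcell
      have hcell' : res[a][b] = pvEntry res a b := by
        unfold pvEntry
        rw [List.getD_eq_getElem res [] h1, List.getD_eq_getElem _ 0 hb1]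
      rw [List.getElem_map, List.getElem_range, hcell', hcell]
      by_cases hab : a = b
      · rw [if_pos hab, if_neg (by rintro ⟨-, h⟩; exact h hab)]
      · rw [if_neg hab]
        have hmm : min a b < max a b := by omega
        have hmaxn : max a b < n := by omega
        rw [if_pos ⟨(mem_pvPairs n _ _).mpr ⟨hmm, hmaxn⟩, hab⟩]
        unfold pvVal
        rcases Nat.lt_or_ge b a with hba | hle
        · rw [if_pos hba, Nat.min_eq_right (le_of_lt hba), Nat.max_eq_left (le_of_lt hba)]
        · have hab' : a < b := by omega
          rw [if_neg (by omega), Nat.min_eq_left (le_of_lt hab'), Nat.max_eq_right (le_of_lt hab')]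

-- closed-form cell function
def pvF (tri : List (List Int)) (a b : Nat) : Int :=
  if a = b then 0
  else if b < a then (tri.getD (a - 1) []).getD b 0
  else (tri.getD (b - 1) []).getD a 0

theorem pvFull_eq_map (tri : List (List Int)) :
    pvFull tri = (List.range (tri.length + 1)).map (fun a =>
      (List.range (tri.length + 1)).map (fun b => pvF tri a b)) := rfl

-- pvF only reads rows below the index bound, so appending a row preserves small cells
theorem pvF_append (t : List (List Int)) (r : List Int) (a b : Nat)
    (ha : a < t.length + 1) (hb : b < t.length + 1) :
    pvF (t ++ [r]) a b = pvF t a b := by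
  unfold pvF
  have h1 : ∀ i, i < t.length → (t ++ [r]).getD i [] = t.getD i [] := by
    intro i hi
    simp [List.getD, List.getElem?_append_left hi]
  split_ifs with h h'
  · rfl
  · rw [h1 (a - 1) (by omega)]
  · rw [h1 (b - 1) (by omega)]

theorem pv_zipWith_self {α β : Type} (f : α → α → β) (l : List α) :
    List.zipWith f l l = l.map (fun a => f a a) := by
  induction l with
  | nil => rfl
  | cons x xs ih => simp

-- one bordering step applied to the closed form yields the closed form one size up
theorem pvStep_full (t : List (List Int)) (r : List Int) (n : Nat)
    (hn : n = t.length + 1) (hr : n ≤ r.length) :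
    pvStep (pvFull t) (t.length : Int) r = pvFull (t ++ [r]) := by
  have hk : ((t.length : Int) + 1) = (n : Int) := by rw [hn]; push_cast; ring
  have hslice : PySem.List.slice r none (some ((t.length : Int) + 1)) = r.take n := by
    rw [hk, PySem.List.slice_to_natCast]
  have hblen : (r.take n).length = n := by simp [List.length_take]; omega
  have hlastrow : (t ++ [r]).getD t.length [] = r := by
    rw [List.getD_eq_getElem _ [] (by simp)]
    simp
  have htake : r.take n = (List.range n).map (fun b => r.getD b 0) := by
    apply List.ext_getElem
    · simp [List.length_take]; omega
    · intro i h1 h2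
      have hi : i < n := by simpa using h2
      rw [List.getElem_take, List.getElem_map, List.getElem_range,
        List.getD_eq_getElem r 0 (by omega)]
  have hpf1 : ∀ b, b < n → pvF (t ++ [r]) n b = r.getD b 0 := by
    intro b hb
    unfold pvF
    rw [if_neg (by omega), if_pos hb, show n - 1 = t.length by omega, hlastrow]
  have hpf2 : ∀ a, a < n → pvF (t ++ [r]) a n = r.getD a 0 := by
    intro a ha
    unfold pvF
    rw [if_neg (by omega), if_neg (by omega), show n - 1 = t.length by omega, hlastrow]
  have hfl : (pvFull t).length = n := by simp [pvFull]; omega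
  unfold pvStep
  rw [hslice]
  show (List.zipWith (fun r v => r ++ [v]) (pvFull t) (r.take n) ++
      (pvFull t).drop (r.take n).length) ++ [r.take n ++ [0]] = pvFull (t ++ [r])
  rw [hblen, List.drop_eq_nil_iff.mpr (by omega), List.append_nil]
  rw [pvFull_eq_map t, pvFull_eq_map (t ++ [r]), htake,
    show t.length + 1 = n from hn.symm,
    show (t ++ [r]).length + 1 = n + 1 by simp [hn]]
  rw [List.zipWith_map, pv_zipWith_self]
  have hrow_old : ∀ a, a < n →
      (List.range n).map (fun b => pvF t a b) ++ [r.getD a 0]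
        = (List.range (n + 1)).map (fun b => pvF (t ++ [r]) a b) := by
    intro a ha
    rw [List.range_succ, List.map_append]
    congr 1
    · exact List.map_congr_left (fun b hb =>
        (pvF_append t r a b (by omega) (by have := List.mem_range.mp hb; omega)).symm)
    · simp only [List.map_cons, List.map_nil]
      rw [hpf2 a ha]
  have hrow_new : (List.range n).map (fun b => r.getD b 0) ++ [0]
        = (List.range (n + 1)).map (fun b => pvF (t ++ [r]) n b) := by
    rw [List.range_succ, List.map_append]
    congr 1
    · exact List.map_congr_left (fun b hb => (hpf1 b (List.mem_range.mp hb)).symm)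
    · simp only [List.map_cons, List.map_nil]
      unfold pvF
      rw [if_pos rfl]
  set F := fun a => (List.range (n + 1)).map (fun b => pvF (t ++ [r]) a b) with hF
  rw [List.range_succ, List.map_append]
  congr 1
  · apply List.map_congr_left
    intro a hamem
    rw [hF]
    exact hrow_old a (List.mem_range.mp hamem)
  · simp only [List.map_cons, List.map_nil, hF]
    rw [← hrow_new]

-- Pre_ restricts to a prefix
theorem pre_prefix (t : List (List Int)) (r : List Int)
    (h : Pre_from_triangular (t ++ [r])) : Pre_from_triangular t := by
  intro k hk
  have := h k (by simp; omega)
  rwa [List.getD_eq_getElem _ [] (by simp; omega),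
    List.getElem_append_left hk, ← List.getD_eq_getElem _ [] hk] at this

-- B computes the closed form
theorem B_eq_pvFull (tri : List (List Int)) (hpre : Pre_from_triangular tri) :
    from_triangular_alt tri = pvFull tri := by
  induction tri using List.reverseRecOn with
  | nil => decide
  | append_singleton t r ih =>
    have hpret : Pre_from_triangular t := pre_prefix t r hpre
    have hr : t.length + 1 ≤ r.length := by
      have e : (t ++ [r]).getD t.length [] = r := by
        rw [List.getD_eq_getElem _ [] (by simp)]
        simp
      have := hpre t.length (by simp)
      rwa [e] at this
    unfold from_triangular_alt
    rw [PySem.List.enumerate_append, List.foldl_append]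
    have hfold : (PySem.List.enumerate t 0).foldl (fun d p => pvStep d p.1 p.2) [[(0 : Int)]]
        = pvFull t := by
      have := ih hpret
      unfold from_triangular_alt at this
      exact this
    rw [hfold]
    simp only [PySem.List.enumerate, List.foldl_cons, List.foldl_nil]
    rw [show (0 : Int) + (t.length : Int) = (t.length : Int) by ring]
    exact pvStep_full t r (t.length + 1) rfl hr

-- ===== VERDICT (by name: the statement is the Claim_ definition above) =====
theorem from_triangular_spec : Claim_equal_from_triangular := by
  intro tri _ hpre
  unfold Spec_from_triangular
  rw [A_eq_pvFull, B_eq_pvFull tri hpre]
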